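-- pv_equiv track=rewrite | github.com/JissiChoi/ComfyUI-Jissi-List | jissi_node.py | process
-- ===== SOURCE A (Python) =====
-- def process(list1, list2=None, list3=None, list4=None, list5=None):
--     from itertools import product
--
--     # None이 아닌 입력 리스트만 수집
--     input_lists = []
--     for lst in [list1, list2, list3, list4, list5]:
--         if lst is not None:
--             input_lists.append(lst)
--
--     # 모든 가능한 조합 생성
--     matching_lists = list(product(*input_lists))
--     # 매칭된 리스트를 개별 리스트로 분리하고 튜플을 리스트로 변환
--     result_lists = [list(x) for x in zip(*matching_lists)]
--
--     # 사용하지 않는 출력은 빈 리스트로 채움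
--     while len(result_lists) < 5:
--         result_lists.append([])
--
--     return tuple(result_lists)
-- ===== SOURCE B (Python) =====
-- def process(list1, list2=None, list3=None, list4=None, list5=None):
--     lists = [l for l in (list1, list2, list3, list4, list5) if l is not None]
--     # suffix products: suffixes[i] = product of len(lists[j]) for j > i; total = product of all
--     suffixes = []
--     acc = 1
--     for l in reversed(lists):
--         suffixes.append(acc)
--         acc *= len(l)
--     suffixes.reverse()
--     total = acc
--     cols = [[lists[i][(n // suffixes[i]) % len(lists[i])] for n in range(total)]
--             for i in range(len(lists))]
--     cols += [[] for _ in range(5 - len(lists))]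
--     return tuple(cols)
-- ===== Notes on version B (the rewrite author's own statement) =====
-- stated objective: faster
-- what changed: Replaces itertools.product + zip transposition with direct index arithmetic: each output column j is lists[j][(n // suffix_j) % len_j] for n in range(total), using suffix products of the sizes, so no intermediate row tuples are materialised or transposed.
import Mathlib
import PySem

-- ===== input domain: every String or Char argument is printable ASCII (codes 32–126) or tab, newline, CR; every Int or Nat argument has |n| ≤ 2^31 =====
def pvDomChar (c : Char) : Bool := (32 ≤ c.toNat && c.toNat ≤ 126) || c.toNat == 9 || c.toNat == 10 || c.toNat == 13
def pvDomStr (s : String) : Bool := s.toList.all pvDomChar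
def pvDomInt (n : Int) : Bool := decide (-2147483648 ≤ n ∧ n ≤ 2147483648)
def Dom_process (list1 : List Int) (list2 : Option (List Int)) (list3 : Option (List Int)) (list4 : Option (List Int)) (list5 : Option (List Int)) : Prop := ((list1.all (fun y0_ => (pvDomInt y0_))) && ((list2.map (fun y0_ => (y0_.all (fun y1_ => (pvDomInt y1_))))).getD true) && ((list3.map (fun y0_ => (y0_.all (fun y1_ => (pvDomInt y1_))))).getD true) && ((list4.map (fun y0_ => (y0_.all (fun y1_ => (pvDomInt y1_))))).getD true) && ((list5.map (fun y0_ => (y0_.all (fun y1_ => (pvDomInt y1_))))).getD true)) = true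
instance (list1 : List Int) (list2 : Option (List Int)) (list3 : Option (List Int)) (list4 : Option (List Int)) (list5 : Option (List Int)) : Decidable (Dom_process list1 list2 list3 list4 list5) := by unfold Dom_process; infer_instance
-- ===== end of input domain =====

-- B replaces itertools.product + zip transposition by direct index arithmetic over suffix
-- products of the sizes (alternative decomposition; same asymptotic cost, no row tuples built).

-- ===== PORT A =====
-- itertools.product(*input_lists): first list varies slowest, tuples become lists
def prodLists : List (List Int) → List (List Int)
  | [] => [[]]
  | l :: ls => l.flatMap (fun x => (prodLists ls).map (fun t => x :: t))

-- zip(*rows): transpose, stopping at the shortest row (Python zip semantics)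
def zipStar (rows : List (List Int)) : List (List Int) :=
  let m := ((rows.map List.length).min?).getD 0
  (List.range m).map (fun j => rows.map (fun r => r.getD j 0))

def process (list1 : List Int) (list2 : Option (List Int)) (list3 : Option (List Int)) (list4 : Option (List Int)) (list5 : Option (List Int)) : List (List Int) :=
  let input_lists := ([some list1, list2, list3, list4, list5].filterMap id)
  let result := zipStar (prodLists input_lists)
  -- while len(result_lists) < 5: append []
  result ++ List.replicate (5 - result.length) ([] : List Int)

-- ===== PORT B =====
def process_alt (list1 : List Int) (list2 : Option (List Int)) (list3 : Option (List Int)) (list4 : Option (List Int)) (list5 : Option (List Int)) : List (List Int) :=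
  let lists := ([some list1, list2, list3, list4, list5].filterMap id)
  -- backward loop accumulating suffix products, then reverse (as in Source B)
  let p := lists.reverse.foldl (fun (p : List Nat × Nat) l => (p.1 ++ [p.2], p.2 * l.length)) (([] : List Nat), 1)
  let sufs := p.1.reverse
  let total := p.2
  ((List.range lists.length).map (fun i =>
    (List.range total).map (fun n =>
      (lists.getD i []).getD ((n / sufs.getD i 1) % (lists.getD i []).length) 0)))
  ++ List.replicate (5 - lists.length) ([] : List Int)

-- ===== PRECONDITION & SPEC =====
def Spec_process (list1 : List Int) (list2 : Option (List Int)) (list3 : Option (List Int)) (list4 : Option (List Int)) (list5 : Option (List Int)) (out : List (List Int)) : Prop := out = process_alt list1 list2 list3 list4 list5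
instance (list1 : List Int) (list2 : Option (List Int)) (list3 : Option (List Int)) (list4 : Option (List Int)) (list5 : Option (List Int)) (out : List (List Int)) : Decidable (Spec_process list1 list2 list3 list4 list5 out) := by unfold Spec_process; infer_instance

-- ===== CLAIM (what is proved, stated in full; the proofs are below) =====
def Claim_equal_process : Prop := ∀ (list1 : List Int) (list2 : Option (List Int)) (list3 : Option (List Int)) (list4 : Option (List Int)) (list5 : Option (List Int)), Dom_process list1 list2 list3 list4 list5 → Spec_process list1 list2 list3 list4 list5 (process list1 list2 list3 list4 list5)

-- ===== LEMMAS AND PROOFS =====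

-- product of the lengths
def prodLen (ls : List (List Int)) : Nat := ls.foldr (fun l a => a * l.length) 1

-- suffix products: (sufsOf ls)[i] = product of lengths after position i
def sufsOf : List (List Int) → List Nat
  | [] => []
  | _ :: ls => prodLen ls :: sufsOf ls

-- the common mathematical value: the k columns of the cartesian product
def colsMid : List (List Int) → List (List Int)
  | [] => []
  | l :: ls => (l.flatMap (fun x => List.replicate (prodLen ls) x)) ::
      (colsMid ls).map (fun c => (List.replicate l.length c).flatten)

theorem prodLen_cons (l : List Int) (ls : List (List Int)) :
    prodLen (l :: ls) = prodLen ls * l.length := rfl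

theorem fold_sufs (ls : List (List Int)) :
    ls.reverse.foldl (fun (p : List Nat × Nat) l => (p.1 ++ [p.2], p.2 * l.length)) (([] : List Nat), 1)
      = ((sufsOf ls).reverse, prodLen ls) := by
  induction ls with
  | nil => rfl
  | cons l ls ih =>
      simp [List.foldl_append, ih, sufsOf, prodLen_cons]

theorem length_prodLists (ls : List (List Int)) :
    (prodLists ls).length = prodLen ls := by
  induction ls with
  | nil => rfl
  | cons l ls ih =>
      simp [prodLists, prodLen_cons, ih, List.length_flatMap, List.map_const',
        List.sum_replicate]
      ring

theorem mem_prodLists_length (ls : List (List Int)) (r : List Int)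
    (hr : r ∈ prodLists ls) : r.length = ls.length := by
  induction ls generalizing r with
  | nil => simp [prodLists] at hr; simp [hr]
  | cons l ls ih =>
      simp [prodLists] at hr
      obtain ⟨x, _, t, ht, rfl⟩ := hr
      simp [ih t ht]

theorem min?_replicate_succ (n k : Nat) : (List.replicate (n + 1) k).min? = some k := by
  induction n with
  | zero => rfl
  | succ n ih => simp [List.replicate_succ, List.min?_cons] at ih ⊢; simp [ih]

theorem min?_all (xs : List Nat) (k : Nat) (hne : xs ≠ [])
    (h : ∀ x ∈ xs, x = k) : xs.min? = some k := by
  have hx : xs = List.replicate xs.length k := List.eq_replicate_iff.mpr ⟨rfl, h⟩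
  cases hl : xs.length with
  | zero => exact absurd (List.length_eq_zero_iff.mp hl) hne
  | succ n => rw [hl] at hx; rw [hx]; exact min?_replicate_succ n k

theorem flatMap_const {α β : Type} (xs : List α) (c : List β) :
    xs.flatMap (fun _ => c) = (List.replicate xs.length c).flatten := by
  induction xs with
  | nil => rfl
  | cons a t ih => simp [List.flatMap_cons, ih, List.replicate_succ]

theorem colsMid_length (ls : List (List Int)) : (colsMid ls).length = ls.length := by
  induction ls with
  | nil => rfl
  | cons l ls ih => simp [colsMid, ih]

-- A-side characterisation: transposed product columns = colsMid
theorem colsA (ls : List (List Int)) :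
    (List.range ls.length).map (fun j => (prodLists ls).map (fun r => r.getD j 0))
      = colsMid ls := by
  induction ls with
  | nil => rfl
  | cons l ls ih =>
      simp only [List.length_cons, List.range_succ_eq_map, List.map_cons, List.map_map]
      simp only [colsMid]
      congr 1
      · simp only [prodLists, List.map_flatMap, List.map_map, Function.comp_def,
          List.getD_cons_zero]
        simp [List.map_const', length_prodLists]
      · rw [← ih, List.map_map]
        apply List.map_congr_left
        intro j _
        simp only [Function.comp_def, prodLists, List.map_flatMap, List.map_map,
          List.getD_cons_succ]
        rw [flatMap_const]

theorem range_mul_decomp {α : Type} (L N : Nat) (h : Nat → α) :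
    (List.range (L * N)).map h
      = (List.range L).flatMap (fun q => (List.range N).map (fun r => h (q * N + r))) := by
  induction L with
  | zero => simp
  | succ L ih =>
      have e : (L + 1) * N = L * N + N := by ring
      rw [e, List.range_add, List.map_append, ih, List.range_succ, List.flatMap_append]
      simp [List.map_map, Function.comp]

theorem flatMap_range_getD {β : Type} (l : List Int) (g : Int → List β) :
    (List.range l.length).flatMap (fun i => g (l.getD i 0)) = l.flatMap g := by
  induction l with
  | nil => rfl
  | cons x t ih =>
      rw [List.length_cons, List.range_succ_eq_map, List.flatMap_cons, List.flatMap_map]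
      simp only [List.getD_cons_zero, List.getD_cons_succ]
      rw [ih]
      rfl

theorem suf_dvd (ls : List (List Int)) : ∀ i, i < ls.length →
    ∃ c, prodLen ls = c * ((ls.getD i []).length * ((sufsOf ls).getD i 1)) := by
  induction ls with
  | nil => intro i hi; simp at hi
  | cons l ls ih =>
      intro i hi
      cases i with
      | zero =>
          exact ⟨1, by simp [prodLen_cons, sufsOf]; ring⟩
      | succ i =>
          obtain ⟨c, hc⟩ := ih i (by simpa using hi)
          exact ⟨c * l.length, by simp [prodLen_cons, sufsOf, hc]; ring⟩

-- B-side characterisation: index-arithmetic columns = colsMid (total nonzero)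
theorem colsB (ls : List (List Int)) (hN : 0 < prodLen ls) :
    (List.range ls.length).map (fun i =>
      (List.range (prodLen ls)).map (fun n =>
        (ls.getD i []).getD ((n / (sufsOf ls).getD i 1) % (ls.getD i []).length) 0))
      = colsMid ls := by
  induction ls with
  | nil => rfl
  | cons l ls ih =>
      have hN' : 0 < prodLen ls * l.length := by rwa [prodLen_cons] at hN
      have hNls : 0 < prodLen ls := by
        rcases Nat.eq_zero_or_pos (prodLen ls) with h0 | h0
        · rw [h0] at hN'; simp at hN'
        · exact h0
      have hL : 0 < l.length := by
        rcases Nat.eq_zero_or_pos l.length with h0 | h0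
        · rw [h0] at hN'; simp at hN'
        · exact h0
      have e1 : prodLen (l :: ls) = l.length * prodLen ls := by rw [prodLen_cons]; ring
      simp only [List.length_cons, List.range_succ_eq_map, List.map_cons, List.map_map]
      simp only [colsMid]
      congr 1
      · -- head column
        simp only [List.getD_cons_zero, sufsOf, List.getD_cons_zero, e1]
        have step1 : (List.range (l.length * prodLen ls)).map
              (fun n => l.getD ((n / prodLen ls) % l.length) 0)
            = (List.range (l.length * prodLen ls)).map (fun n => l.getD (n / prodLen ls) 0) := by
          apply List.map_congr_left
          intro n hn
          have hlt : n / prodLen ls < l.length :=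
            (Nat.div_lt_iff_lt_mul hNls).mpr (List.mem_range.mp hn)
          rw [Nat.mod_eq_of_lt hlt]
        rw [step1, range_mul_decomp]
        have step2 : ∀ q, (List.range (prodLen ls)).map
              (fun r => l.getD ((q * prodLen ls + r) / prodLen ls) 0)
            = List.replicate (prodLen ls) (l.getD q 0) := by
          intro q
          have hpt : ∀ r ∈ List.range (prodLen ls),
              l.getD ((q * prodLen ls + r) / prodLen ls) 0 = l.getD q 0 := by
            intro r hr
            have hrN : r < prodLen ls := List.mem_range.mp hr
            rw [Nat.mul_comm q (prodLen ls), Nat.mul_add_div hNls,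
              Nat.div_eq_of_lt hrN, Nat.add_zero]
          rw [List.map_congr_left hpt, List.map_const', List.length_range]
        simp only [step2]
        exact flatMap_range_getD l (fun x => List.replicate (prodLen ls) x)
      · -- tail columns
        rw [← ih hNls, List.map_map]
        apply List.map_congr_left
        intro i hi
        have hi' : i < ls.length := List.mem_range.mp hi
        obtain ⟨c, hc⟩ := suf_dvd ls i hi'
        have hs : 0 < (sufsOf ls).getD i 1 := by
          rcases Nat.eq_zero_or_pos ((sufsOf ls).getD i 1) with h0 | h0
          · rw [h0, Nat.mul_zero, Nat.mul_zero] at hc; omega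
          · exact h0
        simp only [Function.comp_def, List.getD_cons_succ, sufsOf, e1]
        rw [range_mul_decomp]
        have hper : ∀ q r, ((q * prodLen ls + r) / (sufsOf ls).getD i 1)
              % (ls.getD i []).length = (r / (sufsOf ls).getD i 1) % (ls.getD i []).length := by
          intro q r
          have e2 : q * prodLen ls + r
              = r + (q * c * (ls.getD i []).length) * ((sufsOf ls).getD i 1) := by
            rw [hc]; ring
          rw [e2, Nat.add_mul_div_right _ _ hs]
          have e3 : r / (sufsOf ls).getD i 1 + q * c * (ls.getD i []).length
              = r / (sufsOf ls).getD i 1 + (q * c) * (ls.getD i []).length := by ring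
          rw [e3, Nat.add_mul_mod_self_right]
        simp only [hper]
        rw [flatMap_const, List.length_range]

theorem main_helper (ls : List (List Int)) (h5 : ls.length ≤ 5) :
    zipStar (prodLists ls) ++ List.replicate (5 - (zipStar (prodLists ls)).length) ([] : List Int)
      = ((List.range ls.length).map (fun i =>
          (List.range (prodLen ls)).map (fun n =>
            (ls.getD i []).getD ((n / (sufsOf ls).getD i 1) % (ls.getD i []).length) 0)))
        ++ List.replicate (5 - ls.length) ([] : List Int) := by
  by_cases hN : prodLen ls = 0
  · have hrows : prodLists ls = [] :=
      List.length_eq_zero_iff.mp (by rw [length_prodLists, hN])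
    rw [hrows]
    have hz : zipStar [] = ([] : List (List Int)) := by simp [zipStar]
    rw [hz, hN]
    simp only [List.range_zero, List.map_nil, List.length_nil, Nat.sub_zero,
      List.nil_append]
    rw [List.map_const', List.length_range, ← List.replicate_add]
    congr 1
    omega
  · have hNpos : 0 < prodLen ls := Nat.pos_of_ne_zero hN
    have hne : prodLists ls ≠ [] := by
      intro h
      exact hN (by rw [← length_prodLists, h]; rfl)
    have hmin : ((prodLists ls).map List.length).min? = some ls.length := by
      apply min?_all
      · simpa using hne
      · intro x hx
        obtain ⟨r, hr, rfl⟩ := List.mem_map.mp hx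
        exact mem_prodLists_length ls r hr
    have hzip : zipStar (prodLists ls)
        = (List.range ls.length).map (fun j => (prodLists ls).map (fun r => r.getD j 0)) := by
      simp [zipStar, hmin]
    rw [hzip, colsA, colsB ls hNpos, colsMid_length]

-- ===== VERDICT (by name: the statement is the Claim_ definition above) =====
theorem process_spec : Claim_equal_process := by
  intro l1 l2 l3 l4 l5 _
  show _ = _
  simp only [process, process_alt, fold_sufs, List.reverse_reverse]
  exact main_helper _ (by
    have := List.length_filterMap_le (id : Option (List Int) → Option (List Int))
      [some l1, l2, l3, l4, l5]
    simpa using this)
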